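-- pv_equiv track=rewrite | github.com/Shreyab1802/Code_Python | MicrosoftRecent/N_Clients_HandmadeItems.py | solve
-- ===== SOURCE A (Python) =====
-- def solve(nums):
--
--   time_taken = 0
--   n = len(nums)
--   smaller_nums = [float('inf')]
--   smaller_nums2 = [float('inf')]
--   for i in range(n):
--     smaller_nums.append(
--       min(nums[i] - 1, smaller_nums[-1])
--     )
--   for i in range(n-1, -1, -1):
--     smaller_nums2.append(
--       min(nums[i] - 1, smaller_nums2[-1])
--     )
--
--   for i in range(n):
--     time = nums[i] - 1
--     for j in range(i):
--       time += min(nums[j] - 1, nums[i] - 1)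
--     for j in range(i+1, n):
--       time += min(nums[i]-1, nums[j])
--     time_taken += (i + time + 1)
--   return time_taken % (10**9)
-- ===== SOURCE B (Python) =====
-- def _msort_inv(a):
--     # merge sort that also counts inversions (pairs p<q with a[p] > a[q])
--     n = len(a)
--     if n <= 1:
--         return a, 0
--     mid = n // 2
--     left, li = _msort_inv(a[:mid])
--     right, ri = _msort_inv(a[mid:])
--     merged = []
--     inv = li + ri
--     i = 0
--     j = 0
--     while i < len(left) and j < len(right):
--         if left[i] <= right[j]:
--             merged.append(left[i])
--             i += 1
--         else:
--             inv += len(left) - i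
--             merged.append(right[j])
--             j += 1
--     merged += left[i:]
--     merged += right[j:]
--     return merged, inv
--
--
-- def solve(nums):
--     n = len(nums)
--     s = sorted(nums)
--     m = 0
--     for k in range(n):
--         m += s[k] * (n - 1 - k)
--     _, inv = _msort_inv(nums)
--     pairs = n * (n - 1) // 2
--     total = n * (n + 1) // 2 + (sum(nums) - n) + 2 * m - 2 * pairs + inv
--     return total % (10 ** 9)
-- ===== Notes on version B (the rewrite author's own statement) =====
-- stated objective: faster
-- what changed: Replaces the O(n^2) double loop over pairs by a closed-form pair decomposition: the pairwise-min sum comes from one sort with positional weights, and the order-dependent correction is an inversion count from a hand-written merge sort.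
import Mathlib
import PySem

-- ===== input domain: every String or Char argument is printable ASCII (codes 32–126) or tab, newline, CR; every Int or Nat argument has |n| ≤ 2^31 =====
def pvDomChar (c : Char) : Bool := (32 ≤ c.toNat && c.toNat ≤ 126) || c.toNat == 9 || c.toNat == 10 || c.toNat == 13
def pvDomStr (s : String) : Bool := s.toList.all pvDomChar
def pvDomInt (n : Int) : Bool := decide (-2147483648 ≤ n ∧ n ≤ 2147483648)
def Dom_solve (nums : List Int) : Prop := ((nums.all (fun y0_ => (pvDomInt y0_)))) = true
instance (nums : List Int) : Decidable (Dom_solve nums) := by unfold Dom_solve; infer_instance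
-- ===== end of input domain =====

-- B replaces A's O(n^2) pairwise double loop by one sort with positional weights plus a merge-sort
-- inversion count (measured faster; asymptotic change O(n^2) → O(n log n)).

-- ===== PORT A =====
-- helper for A's dead-code prefix/suffix-minimum loops: min(int, last) where last may be
-- float('inf') (= none); exact here, since the sentinel only ever meets ints and min(v, inf) = v.
def pvOMin (v : Int) : Option Int → Option Int
  | none => some v
  | some w => some (min v w)

def solve (nums : List Int) : Int :=
  let n : Int := PySem.List.len nums
  let _smaller_nums : List (Option Int) :=
    (PySem.List.pyRange 0 n).foldl
      (fun acc i => acc ++ [pvOMin (PySem.List.pyGetD nums i 0 - 1) (PySem.List.pyGetD acc (-1) none)]) [none]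
  let _smaller_nums2 : List (Option Int) :=
    (PySem.List.pyRange (n-1) (-1) (-1)).foldl
      (fun acc i => acc ++ [pvOMin (PySem.List.pyGetD nums i 0 - 1) (PySem.List.pyGetD acc (-1) none)]) [none]
  let time_taken : Int :=
    (PySem.List.pyRange 0 n).foldl (fun tt i =>
      let time0 := PySem.List.pyGetD nums i 0 - 1
      let time1 := (PySem.List.pyRange 0 i).foldl
        (fun t j => t + min (PySem.List.pyGetD nums j 0 - 1) (PySem.List.pyGetD nums i 0 - 1)) time0
      let time2 := (PySem.List.pyRange (i+1) n).foldl
        (fun t j => t + min (PySem.List.pyGetD nums i 0 - 1) (PySem.List.pyGetD nums j 0)) time1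
      tt + (i + time2 + 1)) 0
  PySem.Int.mod time_taken ((10:Int)^9)

-- ===== PORT B =====
-- the merge 'while i < len(left) and j < len(right)' loop of Source B, with its two tail appends,
-- as the equivalent structural recursion on the two lists
def pvMergeCnt : List Int → List Int → List Int × Int
  | [], r => (r, 0)
  | x :: l, [] => (x :: l, 0)
  | x :: l, y :: r =>
    if x ≤ y then
      let m := pvMergeCnt l (y :: r)
      (x :: m.1, m.2)
    else
      let m := pvMergeCnt (x :: l) r
      (y :: m.1, m.2 + ((l.length : Int) + 1))

-- _msort_inv of Source B; a[:mid] / a[mid:] with 0 ≤ mid ≤ len(a) are take/drop (exact)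
def pvMsortInv (a : List Int) : List Int × Int :=
  if _h : a.length ≤ 1 then (a, 0)
  else
    let mid := a.length / 2
    let L := pvMsortInv (a.take mid)
    let R := pvMsortInv (a.drop mid)
    let M := pvMergeCnt L.1 R.1
    (M.1, L.2 + R.2 + M.2)
termination_by a.length
decreasing_by
  · simp [List.length_take]; omega
  · simp [List.length_drop]; omega

def solve_alt (nums : List Int) : Int :=
  let n : Int := PySem.List.len nums
  let s := PySem.List.sorted nums (fun x => x)
  let m := (PySem.List.pyRange 0 n).foldl
    (fun acc k => acc + PySem.List.pyGetD s k 0 * (n - 1 - k)) 0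
  let inv := (pvMsortInv nums).2
  let pairs := PySem.Int.floordiv (n * (n - 1)) 2
  let total := PySem.Int.floordiv (n * (n + 1)) 2 + (nums.sum - n) + 2 * m - 2 * pairs + inv
  PySem.Int.mod total ((10:Int)^9)

-- ===== PRECONDITION & SPEC =====
def Spec_solve (nums : List Int) (out : Int) : Prop := out = solve_alt nums
instance (nums : List Int) (out : Int) : Decidable (Spec_solve nums out) := by unfold Spec_solve; infer_instance

-- ===== CLAIM (what is proved, stated in full; the proofs are below) =====
def Claim_equal_solve : Prop := ∀ (nums : List Int), Dom_solve nums → Spec_solve nums (solve nums)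

-- ===== LEMMAS AND PROOFS =====
def pvPsum (f : Int → Int → Int) : List Int → Int
  | [] => 0
  | x :: xs => ((xs.map (f x)).sum) + pvPsum f xs

def pvInd (x y : Int) : Int := if y < x then 1 else 0

def pvCross (f : Int → Int → Int) (l r : List Int) : Int :=
  (l.map (fun x => (r.map (f x)).sum)).sum

theorem pvPsum_append (f : Int → Int → Int) (l r : List Int) :
    pvPsum f (l ++ r) = pvPsum f l + pvPsum f r + pvCross f l r := by
  induction l with
  | nil => simp [pvPsum, pvCross]
  | cons x l ih => simp only [pvPsum, pvCross, List.cons_append, List.map_append, List.sum_append, List.map_cons, List.sum_cons] at ih ⊢; rw [ih]; unfold pvCross at *; ring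

theorem pvCross_cons_right (f : Int → Int → Int) (l : List Int) (y : Int) (r : List Int) :
    pvCross f l (y :: r) = (l.map (fun x => f x y)).sum + pvCross f l r := by
  induction l with
  | nil => simp [pvCross]
  | cons x l ih => simp only [pvCross, List.map_cons, List.sum_cons] at ih ⊢; rw [ih]; ring

theorem pvCross_perm (f : Int → Int → Int) {l l' r r' : List Int}
    (hl : l.Perm l') (hr : r.Perm r') : pvCross f l r = pvCross f l' r' := by
  unfold pvCross
  have h1 : ∀ x, (r.map (f x)).sum = (r'.map (f x)).sum := fun x => (hr.map (f x)).sum_eq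
  calc (l.map fun x => (r.map (f x)).sum).sum
      = (l.map fun x => (r'.map (f x)).sum).sum := by
        simp only [h1]
    _ = (l'.map fun x => (r'.map (f x)).sum).sum := (hl.map _).sum_eq

theorem pvPsum_perm (f : Int → Int → Int) (hf : ∀ a b, f a b = f b a)
    {l l' : List Int} (h : l.Perm l') : pvPsum f l = pvPsum f l' := by
  induction h with
  | nil => rfl
  | cons x h ih =>
    simp only [pvPsum]
    rw [ih, (h.map (f x)).sum_eq]
  | swap x y l =>
    simp [pvPsum, hf x y]; ring
  | trans h1 h2 ih1 ih2 => omega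


theorem pvMergeCnt_spec : ∀ (l r : List Int),
    l.Pairwise (· ≤ ·) → r.Pairwise (· ≤ ·) →
    (pvMergeCnt l r).1.Perm (l ++ r) ∧ (pvMergeCnt l r).1.Pairwise (· ≤ ·) ∧
      (pvMergeCnt l r).2 = pvCross pvInd l r
  | [], r, _, hr => by simp [pvMergeCnt, pvCross, hr]
  | x :: l, [], hl, _ => by simp [pvMergeCnt, pvCross, hl]
  | x :: l, y :: r, hl, hr => by
    by_cases hxy : x ≤ y
    · have ih := pvMergeCnt_spec l (y :: r) hl.of_cons hr
      obtain ⟨hp, hs, hc⟩ := ih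
      simp only [pvMergeCnt, if_pos hxy]
      refine ⟨hp.cons x, ?_, ?_⟩
      · refine List.pairwise_cons.mpr ⟨?_, hs⟩
        intro z hz
        have hz' : z ∈ l ++ y :: r := hp.mem_iff.mp hz
        rcases List.mem_append.mp hz' with h1 | h2
        · exact (List.pairwise_cons.mp hl).1 z h1
        · rcases List.mem_cons.mp h2 with rfl | h3
          · exact hxy
          · exact le_trans hxy ((List.pairwise_cons.mp hr).1 z h3)
      · -- count: x contributes nothing against y :: r
        have hsplit : pvCross pvInd (x :: l) (y :: r)
            = ((y :: r).map (pvInd x)).sum + pvCross pvInd l (y :: r) := by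
          simp only [pvCross, List.map_cons, List.sum_cons]
        have hx0 : ((y :: r).map (pvInd x)).sum = 0 := by
          have : ∀ z ∈ y :: r, pvInd x z = 0 := by
            intro z hz
            rcases List.mem_cons.mp hz with rfl | h3
            · simp [pvInd]; omega
            · have := (List.pairwise_cons.mp hr).1 z h3
              simp [pvInd]; omega
          rw [List.sum_eq_zero]
          intro a ha
          rcases List.mem_map.mp ha with ⟨z, hz, rfl⟩
          exact this z hz
        rw [hc, hsplit, hx0]; ring
    · have ih := pvMergeCnt_spec (x :: l) r hl hr.of_cons
      obtain ⟨hp, hs, hc⟩ := ih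
      simp only [pvMergeCnt, if_neg hxy]
      have hperm : (y :: (pvMergeCnt (x :: l) r).1).Perm (x :: l ++ y :: r) := by
        refine ((hp.cons y).trans ?_)
        exact (List.perm_middle).symm
      refine ⟨hperm, ?_, ?_⟩
      · refine List.pairwise_cons.mpr ⟨?_, hs⟩
        intro z hz
        have hz' : z ∈ (x :: l) ++ r := hp.mem_iff.mp hz
        rcases List.mem_append.mp hz' with h1 | h2
        · rcases List.mem_cons.mp h1 with rfl | h3
          · omega
          · have := (List.pairwise_cons.mp hl).1 z h3
            omega
        · exact (List.pairwise_cons.mp hr).1 z h2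
      · -- count: y is below everything in x :: l
        rw [hc, pvCross_cons_right]
        have : ((x :: l).map (fun z => pvInd z y)).sum = (l.length : Int) + 1 := by
          have hall : ∀ z ∈ x :: l, pvInd z y = 1 := by
            intro z hz
            rcases List.mem_cons.mp hz with rfl | h3
            · simp [pvInd]; omega
            · have := (List.pairwise_cons.mp hl).1 z h3
              simp [pvInd]; omega
          rw [List.map_congr_left hall]
          simp
          omega
        rw [this]; ring
termination_by l r => l.length + r.length


theorem pvMsortInv_spec : ∀ (a : List Int),
    (pvMsortInv a).1.Perm a ∧ (pvMsortInv a).1.Pairwise (· ≤ ·) ∧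
      (pvMsortInv a).2 = pvPsum pvInd a
  | a => by
    show (pvMsortInv a).1.Perm a ∧ (pvMsortInv a).1.Pairwise (· ≤ ·) ∧
      (pvMsortInv a).2 = pvPsum pvInd a
    rw [pvMsortInv]
    by_cases h : a.length ≤ 1
    · rw [dif_pos h]
      refine ⟨List.Perm.refl a, ?_, ?_⟩
      · match a, h with
        | [], _ => exact List.Pairwise.nil
        | [x], _ => simp
      · match a, h with
        | [], _ => simp [pvPsum]
        | [x], _ => simp [pvPsum]
    · rw [dif_neg h]
      have hlt1 : (a.take (a.length / 2)).length < a.length := by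
        simp [List.length_take]; omega
      have hlt2 : (a.drop (a.length / 2)).length < a.length := by
        simp [List.length_drop]; omega
      have ihL := pvMsortInv_spec (a.take (a.length / 2))
      have ihR := pvMsortInv_spec (a.drop (a.length / 2))
      obtain ⟨pL, sL, cL⟩ := ihL
      obtain ⟨pR, sR, cR⟩ := ihR
      have hm := pvMergeCnt_spec _ _ sL sR
      obtain ⟨pM, sM, cM⟩ := hm
      have hsplit : a.take (a.length / 2) ++ a.drop (a.length / 2) = a := List.take_append_drop _ _
      refine ⟨?_, sM, ?_⟩
      · exact (pM.trans (pL.append pR)).trans (by rw [hsplit])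
      · show (pvMsortInv (a.take (a.length / 2))).2 + (pvMsortInv (a.drop (a.length / 2))).2
            + (pvMergeCnt (pvMsortInv (a.take (a.length / 2))).1 (pvMsortInv (a.drop (a.length / 2))).1).2
            = pvPsum pvInd a
        rw [cL, cR, cM]
        have hx : pvCross pvInd (pvMsortInv (a.take (a.length / 2))).1 (pvMsortInv (a.drop (a.length / 2))).1
            = pvCross pvInd (a.take (a.length / 2)) (a.drop (a.length / 2)) := pvCross_perm _ pL pR
        rw [hx]
        have hy := pvPsum_append pvInd (a.take (a.length / 2)) (a.drop (a.length / 2))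
        rw [hsplit] at hy
        omega
termination_by a => a.length
decreasing_by
  · exact hlt1
  · exact hlt2

def pvG (x y : Int) : Int := min (x - 1) (y - 1) + min (x - 1) y
def pvTri : Nat → Int
  | 0 => 0
  | Nat.succ k => pvTri k + (k + 1)
def pvWsum : List Int → Int
  | [] => 0
  | x :: xs => x * xs.length + pvWsum xs

theorem pvG_eq (x y : Int) : pvG x y = 2 * min x y - 2 + pvInd x y := by
  unfold pvG pvInd; split <;> omega

theorem pvMapG_sum (x : Int) : ∀ (ys : List Int),
    ((ys.map (pvG x)).sum)
      = 2 * (ys.map (fun y => min x y)).sum - 2 * (ys.map (fun _ => (1:Int))).sum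
        + (ys.map (pvInd x)).sum := by
  intro ys
  induction ys with
  | nil => simp
  | cons y ys ih2 =>
    simp only [List.map_cons, List.sum_cons]
    rw [pvG_eq, ih2]
    ring

theorem pvPsum_decomp : ∀ (xs : List Int),
    pvPsum pvG xs = 2 * pvPsum (fun x y => min x y) xs
      - 2 * pvPsum (fun _ _ => 1) xs + pvPsum pvInd xs := by
  intro xs
  induction xs with
  | nil => simp [pvPsum]
  | cons x xs ih =>
    simp only [pvPsum]
    rw [ih, pvMapG_sum]
    ring

theorem pvPsum_one : ∀ (xs : List Int),
    2 * pvPsum (fun _ _ => 1) xs = (xs.length : Int) * ((xs.length : Int) - 1) := by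
  intro xs
  induction xs with
  | nil => simp [pvPsum]
  | cons x xs ih =>
    simp only [pvPsum, List.map_const', List.sum_replicate, nsmul_eq_mul, mul_one, List.length_cons]
    push_cast
    nlinarith [ih]

theorem pvPsum_min_sorted : ∀ (s : List Int), s.Pairwise (· ≤ ·) →
    pvPsum (fun x y => min x y) s = pvWsum s := by
  intro s hs
  induction s with
  | nil => rfl
  | cons x xs ih =>
    simp only [pvPsum, pvWsum]
    rw [ih hs.of_cons]
    congr 1
    have : ∀ y ∈ xs, min x y = x := fun y hy => min_eq_left ((List.pairwise_cons.mp hs).1 y hy)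
    rw [List.map_congr_left this]
    simp [mul_comm]

theorem pvSum_sub_one : ∀ (xs : List Int),
    ((xs.map (fun x => x - 1)).sum) = xs.sum - xs.length := by
  intro xs
  induction xs with
  | nil => simp
  | cons x xs ih => simp only [List.map_cons, List.sum_cons, List.length_cons]; push_cast; omega

theorem pvTri_two (n : Nat) : 2 * pvTri n = (n : Int) * ((n : Int) + 1) := by
  induction n with
  | zero => rfl
  | succ k ih => simp only [pvTri]; push_cast; nlinarith [ih]

-- the weighted-sum loop of B: index form to structural form
theorem pvWsum_range : ∀ (s : List Int),
    (((List.range s.length).map (fun k => s.getD k 0 * ((s.length : Int) - 1 - (k : Int)))).sum)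
      = pvWsum s := by
  intro s
  induction s with
  | nil => simp [pvWsum]
  | cons x xs ih =>
    simp only [List.length_cons]
    rw [List.range_succ_eq_map]
    simp only [List.map_cons, List.sum_cons, List.map_map, pvWsum]
    have h1 : (List.map ((fun k => (x :: xs).getD k 0 * (((xs.length + 1 : Nat) : Int) - 1 - (k : Int))) ∘ Nat.succ) (List.range xs.length))
        = List.map (fun k => xs.getD k 0 * ((xs.length : Int) - 1 - (k : Int))) (List.range xs.length) := by
      apply List.map_congr_left
      intro k _
      simp only [Function.comp, List.getD_cons_succ]
      push_cast
      ring
    rw [h1, ih]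
    simp only [List.getD_cons_zero]
    push_cast
    ring


theorem solve_alt_eq_core (nums : List Int) :
    solve_alt nums = PySem.Int.mod
      (pvTri nums.length + ((nums.map (fun x => x - 1)).sum) + pvPsum pvG nums) ((10:Int)^9) := by
  obtain ⟨pS, sS, cS⟩ := pvMsortInv_spec nums
  have hsortperm : (PySem.List.sorted nums (fun x => x)).Perm nums :=
    PySem.List.sorted_perm nums (fun x => x) false
  have hsortlen : (PySem.List.sorted nums (fun x => x)).length = nums.length := hsortperm.length_eq
  have hpair : (PySem.List.sorted nums (fun x => x)).Pairwise (· ≤ ·) := by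
    have := PySem.List.sorted_pairwise nums (fun x => x)
    simpa using this
  have hm : ((PySem.List.pyRange 0 ((nums.length : Int))).map
      (fun k => PySem.List.pyGetD (PySem.List.sorted nums (fun x => x)) k 0 * ((nums.length : Int) - 1 - k))).sum
      = pvPsum (fun x y => min x y) nums := by
    rw [PySem.List.pyRange_one]
    simp only [List.map_map, Int.sub_zero, Int.toNat_natCast]
    have heq : (List.map ((fun k => PySem.List.pyGetD (PySem.List.sorted nums (fun x => x)) k 0 * ((nums.length : Int) - 1 - k)) ∘ (fun (k : Nat) => (0 : Int) + (k : Int))) (List.range nums.length))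
        = List.map (fun (k : Nat) => (PySem.List.sorted nums (fun x => x)).getD k 0 * (((PySem.List.sorted nums (fun x => x)).length : Int) - 1 - (k : Int))) (List.range nums.length) := by
      apply List.map_congr_left
      intro k _
      simp [PySem.List.pyGetD_natCast, hsortlen]
    rw [heq, ← hsortlen]
    rw [pvWsum_range]
    rw [← pvPsum_min_sorted _ hpair]
    exact pvPsum_perm _ (fun a b => min_comm a b) hsortperm
  have hfd1 : PySem.Int.floordiv ((nums.length : Int) * ((nums.length : Int) + 1)) 2 = pvTri nums.length := by
    rw [PySem.Int.floordiv_eq_ediv_of_pos (by omega)]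
    have := pvTri_two nums.length
    omega
  have hfd2 : PySem.Int.floordiv ((nums.length : Int) * ((nums.length : Int) - 1)) 2
      = pvPsum (fun _ _ => 1) nums := by
    rw [PySem.Int.floordiv_eq_ediv_of_pos (by omega)]
    have := pvPsum_one nums
    omega
  unfold solve_alt
  simp only [PySem.List.foldl_add, PySem.List.len_eq]
  rw [hm, hfd1, hfd2, cS]
  congr 1
  rw [pvPsum_decomp, pvSum_sub_one]
  ring

theorem pvPsum_snoc (f : Int → Int → Int) (xs : List Int) (b : Int) :
    pvPsum f (xs ++ [b]) = pvPsum f xs + (xs.map (fun x => f x b)).sum := by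
  rw [pvPsum_append]
  simp [pvPsum, pvCross]

theorem pvGetD_append_left (xs : List Int) (b : Int) {i : Int} (h0 : 0 ≤ i) (h1 : i < (xs.length : Int)) :
    PySem.List.pyGetD (xs ++ [b]) i 0 = PySem.List.pyGetD xs i 0 := by
  rw [PySem.List.pyGetD_eq_getElem _ 0 h0 (by simp; omega),
      PySem.List.pyGetD_eq_getElem _ 0 h0 h1]
  rw [List.getElem_append_left (by omega)]

theorem pvGetD_append_last (xs : List Int) (b : Int) :
    PySem.List.pyGetD (xs ++ [b]) (xs.length : Int) 0 = b := by
  rw [PySem.List.pyGetD_eq_getElem _ 0 (by omega) (by simp)]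
  simp

def pvF (xs : List Int) (i : Int) : Int :=
  i + ((PySem.List.pyGetD xs i 0 - 1)
    + ((PySem.List.pyRange 0 i).map
        (fun j => min (PySem.List.pyGetD xs j 0 - 1) (PySem.List.pyGetD xs i 0 - 1))).sum
    + ((PySem.List.pyRange (i+1) (xs.length : Int)).map
        (fun j => min (PySem.List.pyGetD xs i 0 - 1) (PySem.List.pyGetD xs j 0))).sum) + 1

theorem pvMap_getD_eq (xs : List Int) (h : Int → Int) :
    ((PySem.List.pyRange 0 (xs.length : Int)).map (fun j => h (PySem.List.pyGetD xs j 0))).sum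
      = (xs.map h).sum := by
  rw [show (fun j => h (PySem.List.pyGetD xs j 0)) = h ∘ (fun j => PySem.List.pyGetD xs j 0) from rfl]
  rw [← List.map_map, PySem.List.map_pyGetD_pyRange_zero']

theorem pvAS : ∀ (xs : List Int),
    ((PySem.List.pyRange 0 (xs.length : Int)).map (pvF xs)).sum
      = pvTri xs.length + ((xs.map (fun x => x - 1)).sum) + pvPsum pvG xs := by
  intro xs
  induction xs using List.reverseRecOn with
  | nil => simp [PySem.List.pyRange_one_eq_nil, pvTri, pvPsum]
  | append_singleton xs b ih =>
    have hn : ((xs ++ [b]).length : Int) = (xs.length : Int) + 1 := by simp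
    rw [hn, PySem.List.pyRange_one_succ_right (by omega), List.map_append, List.sum_append]
    -- old part: each pvF (xs++[b]) i = pvF xs i + min (a_i - 1) b for i < n
    have hold : ((PySem.List.pyRange 0 (xs.length : Int)).map (pvF (xs ++ [b]))).sum
        = ((PySem.List.pyRange 0 (xs.length : Int)).map
            (fun i => pvF xs i + min (PySem.List.pyGetD xs i 0 - 1) b)).sum := by
      apply congrArg
      apply List.map_congr_left
      intro i hi
      obtain ⟨h0, h1⟩ := PySem.List.mem_pyRange_one.mp hi
      unfold pvF
      rw [hn, pvGetD_append_left xs b h0 h1]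
      have hs1 : ((PySem.List.pyRange 0 i).map
          (fun j => min (PySem.List.pyGetD (xs ++ [b]) j 0 - 1) (PySem.List.pyGetD xs i 0 - 1))).sum
          = ((PySem.List.pyRange 0 i).map
          (fun j => min (PySem.List.pyGetD xs j 0 - 1) (PySem.List.pyGetD xs i 0 - 1))).sum := by
        apply congrArg
        apply List.map_congr_left
        intro j hj
        obtain ⟨hj0, hj1⟩ := PySem.List.mem_pyRange_one.mp hj
        rw [pvGetD_append_left xs b hj0 (by omega)]
      have hs2 : ((PySem.List.pyRange (i+1) ((xs.length : Int) + 1)).map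
          (fun j => min (PySem.List.pyGetD xs i 0 - 1) (PySem.List.pyGetD (xs ++ [b]) j 0))).sum
          = ((PySem.List.pyRange (i+1) (xs.length : Int)).map
          (fun j => min (PySem.List.pyGetD xs i 0 - 1) (PySem.List.pyGetD xs j 0))).sum
            + min (PySem.List.pyGetD xs i 0 - 1) b := by
        rw [PySem.List.pyRange_one_succ_right (by omega), List.map_append, List.sum_append]
        congr 1
        · apply congrArg
          apply List.map_congr_left
          intro j hj
          obtain ⟨hj0, hj1⟩ := PySem.List.mem_pyRange_one.mp hj
          rw [pvGetD_append_left xs b (by omega) hj1]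
        · simp [pvGetD_append_last xs b]
      rw [hs1, hs2]
      ring
    rw [hold]
    -- split the added term off
    rw [PySem.List.sum_map_add_int, ih]
    -- new index = n
    have hnew : pvF (xs ++ [b]) (xs.length : Int)
        = (xs.length : Int) + 1 + (b - 1)
          + ((xs.map (fun x => min (x - 1) (b - 1))).sum) := by
      unfold pvF
      rw [hn, pvGetD_append_last xs b]
      rw [PySem.List.pyRange_one_eq_nil (a := (xs.length : Int) + 1) (b := (xs.length : Int) + 1) (by omega)]
      have hs1 : ((PySem.List.pyRange 0 (xs.length : Int)).map
          (fun j => min (PySem.List.pyGetD (xs ++ [b]) j 0 - 1) (b - 1))).sum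
          = (xs.map (fun x => min (x - 1) (b - 1))).sum := by
        rw [show ((PySem.List.pyRange 0 (xs.length : Int)).map
            (fun j => min (PySem.List.pyGetD (xs ++ [b]) j 0 - 1) (b - 1)))
            = ((PySem.List.pyRange 0 (xs.length : Int)).map
            (fun j => min (PySem.List.pyGetD xs j 0 - 1) (b - 1))) from by
          apply List.map_congr_left
          intro j hj
          obtain ⟨hj0, hj1⟩ := PySem.List.mem_pyRange_one.mp hj
          rw [pvGetD_append_left xs b hj0 hj1]]
        exact pvMap_getD_eq xs (fun v => min (v - 1) (b - 1))
      rw [hs1]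
      simp
      ring
    -- extra sum over old indices
    have hextra : ((PySem.List.pyRange 0 (xs.length : Int)).map
        (fun i => min (PySem.List.pyGetD xs i 0 - 1) b)).sum
        = (xs.map (fun x => min (x - 1) b)).sum :=
      pvMap_getD_eq xs (fun v => min (v - 1) b)
    rw [hextra]
    simp only [List.map_cons, List.sum_cons, List.map_nil, List.sum_nil, hnew]
    -- RHS pieces
    have hTri : pvTri (xs ++ [b]).length = pvTri xs.length + ((xs.length : Int) + 1) := by
      simp [pvTri]
    have hSub : (((xs ++ [b]).map (fun x => x - 1)).sum) = ((xs.map (fun x => x - 1)).sum) + (b - 1) := by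
      simp
    have hPsum : pvPsum pvG (xs ++ [b]) = pvPsum pvG xs
        + ((xs.map (fun x => min (x - 1) (b - 1))).sum) + ((xs.map (fun x => min (x - 1) b)).sum) := by
      rw [pvPsum_snoc]
      unfold pvG
      rw [PySem.List.sum_map_add_int]
      ring
    rw [hTri, hSub, hPsum]
    ring



theorem solve_eq_core (nums : List Int) :
    solve nums = PySem.Int.mod
      (pvTri nums.length + ((nums.map (fun x => x - 1)).sum) + pvPsum pvG nums) ((10:Int)^9) := by
  have h := pvAS nums
  simp only [solve, PySem.List.foldl_add, PySem.List.len_eq, zero_add]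
  congr 1

-- ===== VERDICT (by name: the statement is the Claim_ definition above) =====
theorem solve_spec : Claim_equal_solve := by
  intro nums _
  unfold Spec_solve
  rw [solve_eq_core, solve_alt_eq_core]
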